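-- pv_equiv track=rewrite | github.com/vicvv/algo | dynamic/squareOfZeroes_dynamic.py | preComputeNumOfZeroes
-- ===== SOURCE A (Python) =====
-- def preComputeNumOfZeroes(matrix):
--     infoMatrix = [[x for x in row] for row in matrix]
--
--     n = len(matrix)
--     lastIndex = n - 1
--
--     for row in range(n):
--         for col in range(n):
--             numZeroes = 1 if matrix[row][col] == 0  else 0
--             infoMatrix[row][col] = {
--                 'numZeroesBelow': numZeroes,
--                 'numZeroesRight': numZeroes,
--             }
--     for row in reversed(range(n)):
--         for col in reversed(range(n)):
--             if matrix[row][col] == 1: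
--                 continue
--             if row < lastIndex:
--                 infoMatrix[row][col]['numZeroesBelow'] += infoMatrix[row + 1][col]['numZeroesBelow']
--             if col < lastIndex:
--                 infoMatrix[row][col]['numZeroesRight'] += infoMatrix[row][col+1]['numZeroesRight']
--     return infoMatrix
-- ===== SOURCE B (Python) =====
-- def preComputeNumOfZeroes(matrix):
--     # Decomposition: one generic 1-D suffix sweep, applied per column (for
--     # numZeroesBelow) and per row (for numZeroesRight); the grid of dicts is
--     # assembled at the end from the two value grids.
--     n = len(matrix)
--     if any(len(row) != n for row in matrix):
--         raise ValueError("matrix must be square")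
--
--     def sweep(values):
--         # out[i] = number of zeroes in values[i:] that appear before the first 1
--         out = [0] * len(values)
--         run = 0
--         for i in range(len(values) - 1, -1, -1):
--             v = values[i]
--             if v == 1:
--                 run = 0
--             elif v == 0:
--                 run += 1
--             out[i] = run
--         return out
--
--     belowCols = [sweep([matrix[r][c] for r in range(n)]) for c in range(n)]
--     rightRows = [sweep(matrix[r][:n]) for r in range(n)]
--     return [[{'numZeroesBelow': belowCols[c][r], 'numZeroesRight': rightRows[r][c]}
--              for c in range(n)] for r in range(n)]
-- ===== Notes on version B (the rewrite author's own statement) =====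
-- stated objective: alternative
-- what changed: B replaces A's whole-matrix init pass plus combined reversed double loop mutating dicts in place with a single generic 1-D suffix zero-run sweep applied per column (numZeroesBelow) and per row (numZeroesRight), assembling the grid of dicts at the end; Pre_ excludes non-square matrices, on which A raises IndexError or returns rows mixing dicts with leftover ints while B raises ValueError.
-- outside the precondition, e.g. on preComputeNumOfZeroes([[5, 7]]): A returns [[{'numZeroesBelow': 0, 'numZeroesRight': 0}, 7]], B raises ValueError
import Mathlib
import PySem

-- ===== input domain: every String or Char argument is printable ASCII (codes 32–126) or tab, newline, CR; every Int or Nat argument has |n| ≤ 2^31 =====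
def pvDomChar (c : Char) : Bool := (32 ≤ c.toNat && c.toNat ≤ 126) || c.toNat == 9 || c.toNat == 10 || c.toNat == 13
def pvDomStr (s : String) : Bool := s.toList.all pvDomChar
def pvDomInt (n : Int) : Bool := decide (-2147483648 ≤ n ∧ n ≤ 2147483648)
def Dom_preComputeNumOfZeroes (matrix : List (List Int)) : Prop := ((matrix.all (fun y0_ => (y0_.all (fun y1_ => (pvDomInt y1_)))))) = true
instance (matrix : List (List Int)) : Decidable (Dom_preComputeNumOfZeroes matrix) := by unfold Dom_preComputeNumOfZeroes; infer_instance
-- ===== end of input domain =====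

-- B computes the two suffix zero-run grids with a generic 1-D sweep per column and per row
-- instead of A's init pass + reversed double loop mutating dicts in place (alternative decomposition).


-- ===== PORT A =====
-- matrix[row][col]; on Pre_ inputs every index used is in range, where pyGetD is exact
def pvGetA (m : List (List Int)) (r c : Int) : Int :=
  PySem.List.pyGetD (PySem.List.pyGetD m r []) c 0

-- in-place update xs[i] := f xs[i]; the indices A uses are nonnegative and in range on Pre_ inputs
def pvSetAt {α : Type} : List α → Nat → (α → α) → List α
  | [], _, _ => []
  | x :: xs, 0, f => f x :: xs
  | x :: xs, Nat.succ i, f => x :: pvSetAt xs i f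

-- one iteration of A's second (reversed) double loop at (row, col);
-- d['numZeroesBelow'] / += are Dict.getD/modify with default 0 — exact, the keys are always present
def pvStepA (matrix : List (List Int)) (lastIndex : Int)
    (g : List (List (List (String × Int)))) (row col : Int) : List (List (List (String × Int))) :=
  if pvGetA matrix row col = 1 then g
  else
    let g1 :=
      if row < lastIndex then
        let add := PySem.Dict.getD (PySem.Dict.mk (PySem.List.pyGetD (PySem.List.pyGetD g (row + 1) []) col [])) "numZeroesBelow" 0
        pvSetAt g row.toNat (fun rw => pvSetAt rw col.toNat
          (fun cell => (PySem.Dict.modify (PySem.Dict.mk cell) "numZeroesBelow" 0 (· + add)).items))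
      else g
    if col < lastIndex then
      let add := PySem.Dict.getD (PySem.Dict.mk (PySem.List.pyGetD (PySem.List.pyGetD g1 row []) (col + 1) [])) "numZeroesRight" 0
      pvSetAt g1 row.toNat (fun rw => pvSetAt rw col.toNat
        (fun cell => (PySem.Dict.modify (PySem.Dict.mk cell) "numZeroesRight" 0 (· + add)).items))
    else g1

def preComputeNumOfZeroes (matrix : List (List Int)) : List (List (List (String × Int))) :=
  let n : Int := matrix.length
  let lastIndex := n - 1
  -- first double loop: every cell of infoMatrix is overwritten with the init dict
  -- (on Pre_ inputs the initial int copy of the row is fully overwritten, so it is not materialised)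
  let info := (PySem.List.pyRange 0 n 1).map (fun row =>
    (PySem.List.pyRange 0 n 1).map (fun col =>
      let numZeroes : Int := if pvGetA matrix row col = 0 then 1 else 0
      [("numZeroesBelow", numZeroes), ("numZeroesRight", numZeroes)]))
  (PySem.List.pyRange (n - 1) (-1) (-1)).foldl (fun g row =>
    (PySem.List.pyRange (n - 1) (-1) (-1)).foldl (fun g col => pvStepA matrix lastIndex g row col) g) info

-- ===== PORT B =====
-- Source B's ValueError guard for non-square input fires only outside Pre_ and is not modelled here
def pvGetB (m : List (List Int)) (r c : Int) : Int :=
  PySem.List.pyGetD (PySem.List.pyGetD m r []) c 0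

-- Source B's sweep: right-to-left loop keeping the running counter 'run', as structural recursion
-- from the right; returns (out, run)
def pvSweepB : List Int → List Int × Int
  | [] => ([], 0)
  | v :: rest =>
    let p := pvSweepB rest
    let run : Int := if v = 1 then 0 else if v = 0 then p.2 + 1 else p.2
    (run :: p.1, run)

def preComputeNumOfZeroes_alt (matrix : List (List Int)) : List (List (List (String × Int))) :=
  let n : Int := matrix.length
  let belowCols := (PySem.List.pyRange 0 n 1).map (fun c =>
    (pvSweepB ((PySem.List.pyRange 0 n 1).map (fun r => pvGetB matrix r c))).1)
  let rightRows := (PySem.List.pyRange 0 n 1).map (fun r =>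
    (pvSweepB (PySem.List.slice (PySem.List.pyGetD matrix r []) none (some n))).1)
  (PySem.List.pyRange 0 n 1).map (fun r =>
    (PySem.List.pyRange 0 n 1).map (fun c =>
      [("numZeroesBelow", PySem.List.pyGetD (PySem.List.pyGetD belowCols c []) r 0),
       ("numZeroesRight", PySem.List.pyGetD (PySem.List.pyGetD rightRows r []) c 0)]))

-- ===== PRECONDITION & SPEC =====
-- Pre_ excludes non-square inputs: a row shorter than len(matrix) makes A raise IndexError, and a
-- longer row makes A return a row mixing dicts with leftover ints — not a value of the declared
-- type; B validates its input and raises ValueError on every non-square matrix.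
def Pre_preComputeNumOfZeroes (matrix : List (List Int)) : Prop :=
  ∀ row ∈ matrix, row.length = matrix.length
instance (matrix : List (List Int)) : Decidable (Pre_preComputeNumOfZeroes matrix) := by
  unfold Pre_preComputeNumOfZeroes; infer_instance
def pvWitness_preComputeNumOfZeroes : List (List Int) := [[0, 1], [2, 0]]

def Spec_preComputeNumOfZeroes (matrix : List (List Int)) (out : List (List (List (String × Int)))) : Prop := out = preComputeNumOfZeroes_alt matrix
instance (matrix : List (List Int)) (out : List (List (List (String × Int)))) : Decidable (Spec_preComputeNumOfZeroes matrix out) := by unfold Spec_preComputeNumOfZeroes; infer_instance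

-- ===== CLAIM (what is proved, stated in full; the proofs are below) =====
def Claim_equal_preComputeNumOfZeroes : Prop := ∀ (matrix : List (List Int)), Dom_preComputeNumOfZeroes matrix → Pre_preComputeNumOfZeroes matrix → Spec_preComputeNumOfZeroes matrix (preComputeNumOfZeroes matrix)

-- ===== LEMMAS AND PROOFS =====

-- the suffix zero-run count both programs compute
def runVal : List Int → Int
  | [] => 0
  | v :: rest => if v = 1 then 0 else (if v = 0 then 1 else 0) + runVal rest

def geti (m : List (List Int)) (r c : Nat) : Int := (m.getD r []).getD c 0

def colL (m : List (List Int)) (n c : Nat) : List Int := (List.range n).map (fun r => geti m r c)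
def rowL (m : List (List Int)) (n r : Nat) : List Int := (m.getD r []).take n

-- the final value of cell (r, c)
def fcell (m : List (List Int)) (n r c : Nat) : List (String × Int) :=
  [("numZeroesBelow", runVal ((colL m n c).drop r)),
   ("numZeroesRight", runVal ((rowL m n r).drop c))]

-- the init value of cell (r, c)
def icell (m : List (List Int)) (r c : Nat) : List (String × Int) :=
  [("numZeroesBelow", if geti m r c = 0 then (1:Int) else 0),
   ("numZeroesRight", if geti m r c = 0 then (1:Int) else 0)]

-- grid after A's second loop has processed all rows ≥ k
def ggrid (m : List (List Int)) (n k : Nat) : List (List (List (String × Int))) :=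
  (List.range n).map (fun r =>
    if r < k then (List.range n).map (icell m r) else (List.range n).map (fcell m n r))

-- row r mid-inner-loop: cols ≥ j done
def mrow (m : List (List Int)) (n r j : Nat) : List (List (String × Int)) :=
  (List.range n).map (fun c => if c < j then icell m r c else fcell m n r c)

-- grid mid-inner-loop at row r
def hgrid (m : List (List Int)) (n r j : Nat) : List (List (List (String × Int))) :=
  (List.range n).map (fun r' =>
    if r' < r then (List.range n).map (icell m r')
    else if r' = r then mrow m n r j
    else (List.range n).map (fcell m n r'))

theorem length_pvSetAt {α : Type} (l : List α) (i : Nat) (f : α → α) :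
    (pvSetAt l i f).length = l.length := by
  induction l generalizing i with
  | nil => rfl
  | cons x xs ih => cases i <;> simp [pvSetAt, ih]

theorem pvSetAt_getD {α : Type} (l : List α) (i : Nat) (f : α → α) (j : Nat) (d : α) :
    (pvSetAt l i f).getD j d =
      if j = i ∧ j < l.length then f (l.getD j d) else l.getD j d := by
  induction l generalizing i j with
  | nil => simp [pvSetAt]
  | cons x xs ih =>
    cases i with
    | zero => cases j <;> simp [pvSetAt]
    | succ i' =>
      cases j with
      | zero => simp [pvSetAt]
      | succ j' => simpa [pvSetAt, Nat.succ_lt_succ_iff] using ih i' j'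

theorem list_ext_getD {α : Type} (d : α) (l1 l2 : List α)
    (hlen : l1.length = l2.length)
    (h : ∀ j, j < l1.length → l1.getD j d = l2.getD j d) : l1 = l2 := by
  apply List.ext_getElem hlen
  intro i h1 h2
  have := h i h1
  rwa [List.getD_eq_getElem _ _ h1, List.getD_eq_getElem _ _ h2] at this

theorem pvSweepB_snd (l : List Int) : (pvSweepB l).2 = runVal l := by
  induction l with
  | nil => rfl
  | cons v rest ih =>
    simp only [pvSweepB, runVal]
    split_ifs with h1 h2 <;> simp_all <;> omega

theorem pvSweepB_getD (l : List Int) (r : Nat) (h : r < l.length) :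
    (pvSweepB l).1.getD r 0 = runVal (l.drop r) := by
  induction l generalizing r with
  | nil => simp at h
  | cons v rest ih =>
    cases r with
    | zero =>
      have h2 := pvSweepB_snd rest
      simp only [pvSweepB, runVal, List.drop_zero]
      split_ifs with h1 hone <;> simp_all <;> omega
    | succ r' =>
      have hr : r' < rest.length := by simpa using h
      have := ih r' hr
      simp only [pvSweepB]
      simpa using this

theorem colL_length (m : List (List Int)) (n c : Nat) : (colL m n c).length = n := by
  simp [colL]

theorem rowL_length (m : List (List Int)) (hPre : Pre_preComputeNumOfZeroes m)
    (r : Nat) (hr : r < m.length) : (rowL m m.length r).length = m.length := by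
  have hmem : m[r] ∈ m := List.getElem_mem hr
  have hlen := hPre _ hmem
  simp [rowL, List.getD, List.getElem?_eq_getElem hr, hlen]

theorem portB_eq (m : List (List Int)) (hPre : Pre_preComputeNumOfZeroes m) :
    preComputeNumOfZeroes_alt m = (List.range m.length).map (fun r => (List.range m.length).map (fcell m m.length r)) := by
  simp only [preComputeNumOfZeroes_alt, PySem.List.pyRange_zero_natCast, List.map_map]
  apply List.map_congr_left
  intro r hr
  have hrn : r < m.length := List.mem_range.mp hr
  apply List.map_congr_left
  intro c hc
  have hcn : c < m.length := List.mem_range.mp hc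
  simp only [Function.comp_apply, PySem.List.pyGetD_natCast,
    PySem.List.getD_map_range _ _ _ _ hcn, PySem.List.getD_map_range _ _ _ _ hrn]
  have hcol : (List.range m.length).map ((fun rI => pvGetB m rI (c : Int)) ∘ (fun k : Nat => (k : Int)))
      = colL m m.length c := by
    simp [pvGetB, colL, geti, PySem.List.pyGetD_natCast]
  have hrow : PySem.List.slice (m.getD r []) none (some (m.length : Int))
      = rowL m m.length r := by
    rw [PySem.List.slice_to _ (by positivity)]
    simp [rowL]
  rw [hcol, hrow]
  rw [pvSweepB_getD _ _ (by rw [colL_length]; exact hrn),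
      pvSweepB_getD _ _ (by rw [rowL_length m hPre r hrn]; exact hcn)]
  rfl

theorem pvSetAt_pvSetAt {α : Type} (l : List α) (i : Nat) (f g : α → α) :
    pvSetAt (pvSetAt l i f) i g = pvSetAt l i (fun x => g (f x)) := by
  induction l generalizing i with
  | nil => rfl
  | cons x xs ih => cases i <;> simp [pvSetAt, ih]

theorem hgrid_length (m : List (List Int)) (n r j : Nat) : (hgrid m n r j).length = n := by
  simp [hgrid]

theorem hgrid_getD (m : List (List Int)) (n r j i : Nat) (hi : i < n) :
    (hgrid m n r j).getD i [] =
      if i < r then (List.range n).map (icell m i)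
      else if i = r then mrow m n r j
      else (List.range n).map (fcell m n i) := by
  simp only [hgrid]
  rw [PySem.List.getD_map_range _ _ _ _ hi]

theorem mrow_length (m : List (List Int)) (n r j : Nat) : (mrow m n r j).length = n := by
  simp [mrow]

theorem mrow_getD (m : List (List Int)) (n r j c' : Nat) (h : c' < n) :
    (mrow m n r j).getD c' [] = if c' < j then icell m r c' else fcell m n r c' := by
  simp only [mrow]
  rw [PySem.List.getD_map_range _ _ _ _ h]

theorem colL_drop (m : List (List Int)) (n c r : Nat) (hr : r < n) :
    (colL m n c).drop r = geti m r c :: (colL m n c).drop (r+1) := by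
  rw [List.drop_eq_getElem_cons (by simpa [colL_length] using hr)]
  simp [colL]

theorem rowL_getElem (m : List (List Int)) (r c : Nat) (h : c < (rowL m m.length r).length) :
    (rowL m m.length r)[c] = geti m r c := by
  have hc' : c < (m.getD r []).length := by
    simp only [rowL, List.length_take, lt_min_iff] at h
    exact h.2
  simp only [rowL]
  rw [List.getElem_take, geti, List.getD_eq_getElem _ _ hc']

theorem rowL_drop (m : List (List Int)) (hPre : Pre_preComputeNumOfZeroes m)
    (r c : Nat) (hr : r < m.length) (hc : c < m.length) :
    (rowL m m.length r).drop c = geti m r c :: (rowL m m.length r).drop (c+1) := by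
  have hlen := rowL_length m hPre r hr
  rw [List.drop_eq_getElem_cons (by omega : c < (rowL m m.length r).length)]
  rw [rowL_getElem m r c]

theorem colL_drop_top (m : List (List Int)) (n c : Nat) : (colL m n c).drop n = [] := by
  apply List.drop_eq_nil_of_le
  simp [colL_length]

theorem rowL_drop_top (m : List (List Int)) (hPre : Pre_preComputeNumOfZeroes m)
    (r : Nat) (hr : r < m.length) : (rowL m m.length r).drop m.length = [] := by
  apply List.drop_eq_nil_of_le
  rw [rowL_length m hPre r hr]

theorem fcell_expand (m : List (List Int)) (hPre : Pre_preComputeNumOfZeroes m)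
    (r c : Nat) (hr : r < m.length) (hc : c < m.length) (hv : geti m r c ≠ 1) :
    fcell m m.length r c =
      [("numZeroesBelow", (if geti m r c = 0 then (1:Int) else 0) + runVal ((colL m m.length c).drop (r+1))),
       ("numZeroesRight", (if geti m r c = 0 then (1:Int) else 0) + runVal ((rowL m m.length r).drop (c+1)))] := by
  rw [fcell, colL_drop m m.length c r hr, rowL_drop m hPre r c hr hc]
  simp [runVal, hv]

theorem icell_eq_fcell_of_one (m : List (List Int)) (hPre : Pre_preComputeNumOfZeroes m)
    (r c : Nat) (hr : r < m.length) (hc : c < m.length) (hv : geti m r c = 1) :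
    icell m r c = fcell m m.length r c := by
  rw [fcell, colL_drop m m.length c r hr, rowL_drop m hPre r c hr hc]
  simp [icell, runVal, hv]

theorem mrow_succ_eq (m : List (List Int)) (n r c : Nat)
    (h : icell m r c = fcell m n r c) : mrow m n r (c+1) = mrow m n r c := by
  apply List.map_congr_left
  intro c' _
  by_cases h1 : c' = c
  · subst h1; simp [h]
  · have h2 : c' < c + 1 ↔ c' < c := by omega
    simp only [h2]

theorem hgrid_succ_eq (m : List (List Int)) (n r c : Nat)
    (h : icell m r c = fcell m n r c) : hgrid m n r (c+1) = hgrid m n r c := by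
  simp only [hgrid, mrow_succ_eq m n r c h]

-- dict operations on the 2-key literal
theorem dictGetB (b rr : Int) :
    PySem.Dict.getD (PySem.Dict.mk [("numZeroesBelow", b), ("numZeroesRight", rr)]) "numZeroesBelow" 0 = b := by
  rfl

theorem dictGetR (b rr : Int) :
    PySem.Dict.getD (PySem.Dict.mk [("numZeroesBelow", b), ("numZeroesRight", rr)]) "numZeroesRight" 0 = rr := by
  rfl

theorem dictModB (b rr a : Int) :
    (PySem.Dict.modify (PySem.Dict.mk [("numZeroesBelow", b), ("numZeroesRight", rr)]) "numZeroesBelow" 0 (· + a)).items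
      = [("numZeroesBelow", b + a), ("numZeroesRight", rr)] := by
  rfl

theorem dictModR (b rr a : Int) :
    (PySem.Dict.modify (PySem.Dict.mk [("numZeroesBelow", b), ("numZeroesRight", rr)]) "numZeroesRight" 0 (· + a)).items
      = [("numZeroesBelow", b), ("numZeroesRight", rr + a)] := by
  rfl

-- writing cell (r,c) with any h that sends its init value to its final value finishes column c
theorem set_to_hgrid (m : List (List Int)) (n r c : Nat) (hrn : r < n) (hcn : c < n)
    (h : List (String × Int) → List (String × Int))
    (hh : h (icell m r c) = fcell m n r c) :
    pvSetAt (hgrid m n r (c+1)) r (fun rw => pvSetAt rw c h) = hgrid m n r c := by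
  apply list_ext_getD [] _ _ (by simp [length_pvSetAt, hgrid_length])
  intro i hi
  rw [length_pvSetAt, hgrid_length] at hi
  rw [pvSetAt_getD]
  by_cases hir : i = r
  · subst hir
    rw [if_pos ⟨rfl, by rw [hgrid_length]; exact hi⟩]
    rw [hgrid_getD m n i (c+1) i hi, hgrid_getD m n i c i hi]
    simp only [lt_self_iff_false, if_false, if_true]
    apply list_ext_getD [] _ _ (by simp [length_pvSetAt, mrow_length])
    intro j hj
    rw [length_pvSetAt, mrow_length] at hj
    rw [pvSetAt_getD, mrow_length]
    rw [mrow_getD m n i (c+1) j hj, mrow_getD m n i c j hj]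
    by_cases hjc : j = c
    · subst hjc
      simp [hj, hh]
    · have h2 : j < c + 1 ↔ j < c := by omega
      simp only [h2, if_neg (show ¬(j = c ∧ j < n) from fun hx => hjc hx.1)]
  · rw [if_neg (by simp [hir])]
    rw [hgrid_getD m n r (c+1) i hi, hgrid_getD m n r c i hi]
    simp [hir]

theorem stepA_eq (m : List (List Int)) (hPre : Pre_preComputeNumOfZeroes m)
    (r c : Nat) (hr : r < m.length) (hc : c < m.length) :
    pvStepA m ((m.length : Int) - 1) (hgrid m m.length r (c+1)) (r : Int) (c : Int)
      = hgrid m m.length r c := by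
  have hvA : pvGetA m (r : Int) (c : Int) = geti m r c := by
    simp [pvGetA, geti, PySem.List.pyGetD_natCast]
  unfold pvStepA
  rw [hvA]
  by_cases hv1 : geti m r c = 1
  · rw [if_pos hv1]
    exact hgrid_succ_eq m m.length r c (icell_eq_fcell_of_one m hPre r c hr hc hv1)
  · rw [if_neg hv1]
    have hcast1 : ((r : Int) + 1) = ((r + 1 : Nat) : Int) := by push_cast; ring
    have htoNr : (r : Int).toNat = r := Int.toNat_natCast r
    have htoNc : (c : Int).toNat = c := Int.toNat_natCast c
    -- the value read for the below-update (when r+1 < n)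
    have hreadB : ∀ hr1 : r + 1 < m.length,
        PySem.Dict.getD (PySem.Dict.mk (PySem.List.pyGetD
            (PySem.List.pyGetD (hgrid m m.length r (c+1)) ((r : Int) + 1) []) (c : Int) []))
          "numZeroesBelow" 0 = runVal ((colL m m.length c).drop (r+1)) := by
      intro hr1
      rw [hcast1, PySem.List.pyGetD_natCast, PySem.List.pyGetD_natCast,
        hgrid_getD m m.length r (c+1) (r+1) hr1]
      rw [if_neg (by omega), if_neg (by omega)]
      rw [PySem.List.getD_map_range _ _ _ _ hc]
      rw [fcell, dictGetB]
    by_cases hrb : (r : Int) < (m.length : Int) - 1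
    · have hr1 : r + 1 < m.length := by omega
      rw [if_pos hrb]
      simp only [hreadB hr1, htoNr, htoNc, pvSetAt_pvSetAt]
      -- after the below-update, row r cell c holds the partially updated dict
      have hg1row : (pvSetAt (hgrid m m.length r (c+1)) r fun rw =>
            pvSetAt rw c fun cell =>
              (PySem.Dict.modify (PySem.Dict.mk cell) "numZeroesBelow" 0
                (· + runVal ((colL m m.length c).drop (r+1)))).items).getD r []
          = pvSetAt (mrow m m.length r (c+1)) c fun cell =>
              (PySem.Dict.modify (PySem.Dict.mk cell) "numZeroesBelow" 0
                (· + runVal ((colL m m.length c).drop (r+1)))).items := by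
        rw [pvSetAt_getD, if_pos ⟨rfl, by rw [hgrid_length]; exact hr⟩,
          hgrid_getD m m.length r (c+1) r hr]
        simp
      by_cases hcb : (c : Int) < (m.length : Int) - 1
      · have hc1 : c + 1 < m.length := by omega
        rw [if_pos hcb]
        -- read of g1[r][c+1]
        have hreadR : PySem.Dict.getD (PySem.Dict.mk (PySem.List.pyGetD
              (PySem.List.pyGetD (pvSetAt (hgrid m m.length r (c+1)) r fun rw =>
                pvSetAt rw c fun cell =>
                  (PySem.Dict.modify (PySem.Dict.mk cell) "numZeroesBelow" 0
                    (· + runVal ((colL m m.length c).drop (r+1)))).items) (r : Int) [])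
              ((c : Int) + 1) [])) "numZeroesRight" 0
            = runVal ((rowL m m.length r).drop (c+1)) := by
          have hcast2 : ((c : Int) + 1) = ((c + 1 : Nat) : Int) := by push_cast; ring
          rw [PySem.List.pyGetD_natCast, hg1row, hcast2, PySem.List.pyGetD_natCast]
          rw [pvSetAt_getD, if_neg (by omega)]
          rw [mrow_getD m m.length r (c+1) (c+1) hc1, if_neg (by omega)]
          rw [fcell, dictGetR]
        rw [hreadR]
        apply set_to_hgrid m m.length r c hr hc
        rw [icell, dictModB, dictModR,
          fcell_expand m hPre r c hr hc hv1]
      · rw [if_neg hcb]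
        have hc1 : c + 1 = m.length := by omega
        apply set_to_hgrid m m.length r c hr hc
        rw [icell, dictModB, fcell_expand m hPre r c hr hc hv1, hc1,
          rowL_drop_top m hPre r hr]
        simp [runVal]
    · rw [if_neg hrb]
      have hr1 : r + 1 = m.length := by omega
      by_cases hcb : (c : Int) < (m.length : Int) - 1
      · have hc1 : c + 1 < m.length := by omega
        rw [if_pos hcb]
        have hreadR : PySem.Dict.getD (PySem.Dict.mk (PySem.List.pyGetD
              (PySem.List.pyGetD (hgrid m m.length r (c+1)) (r : Int) []) ((c : Int) + 1) []))
              "numZeroesRight" 0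
            = runVal ((rowL m m.length r).drop (c+1)) := by
          have hcast2 : ((c : Int) + 1) = ((c + 1 : Nat) : Int) := by push_cast; ring
          rw [PySem.List.pyGetD_natCast, hcast2, PySem.List.pyGetD_natCast,
            hgrid_getD m m.length r (c+1) r hr, if_neg (by omega), if_pos rfl,
            mrow_getD m m.length r (c+1) (c+1) hc1, if_neg (by omega)]
          rw [fcell, dictGetR]
        rw [hreadR, htoNr, htoNc]
        apply set_to_hgrid m m.length r c hr hc
        rw [icell, dictModR, fcell_expand m hPre r c hr hc hv1, hr1,
          colL_drop_top m m.length c]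
        simp [runVal]
      · rw [if_neg hcb]
        have hc1 : c + 1 = m.length := by omega
        apply hgrid_succ_eq
        rw [icell, fcell_expand m hPre r c hr hc hv1, hr1, hc1,
          colL_drop_top m m.length c, rowL_drop_top m hPre r hr]
        simp [runVal]

theorem hgrid_top (m : List (List Int)) (n k : Nat) :
    hgrid m n k n = ggrid m n (k+1) := by
  apply List.map_congr_left
  intro r' hr'
  have hrn := List.mem_range.mp hr'
  by_cases h1 : r' < k
  · rw [if_pos h1, if_pos (by omega : r' < k + 1)]
  · by_cases h2 : r' = k
    · subst h2
      rw [if_neg h1, if_pos rfl, if_pos (by omega : r' < r' + 1)]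
      apply List.map_congr_left
      intro c hcm
      rw [if_pos (List.mem_range.mp hcm)]
    · rw [if_neg h1, if_neg h2, if_neg (by omega : ¬ r' < k + 1)]

theorem hgrid_bot (m : List (List Int)) (n r : Nat) :
    hgrid m n r 0 = ggrid m n r := by
  apply List.map_congr_left
  intro r' hr'
  by_cases h1 : r' < r
  · rw [if_pos h1, if_pos h1]
  · by_cases h2 : r' = r
    · subst h2
      rw [if_neg h1, if_pos rfl, if_neg h1]
      apply List.map_congr_left
      intro c _
      rw [if_neg (by omega : ¬ c < 0)]
    · rw [if_neg h1, if_neg h2, if_neg h1]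

theorem innerFold_eq (m : List (List Int)) (hPre : Pre_preComputeNumOfZeroes m)
    (r : Nat) (hr : r < m.length) (j : Nat) (hj : j ≤ m.length) :
    (PySem.List.pyRange ((j : Int) - 1) (-1) (-1)).foldl
      (fun g col => pvStepA m ((m.length : Int) - 1) g (r : Int) col)
      (hgrid m m.length r j)
      = hgrid m m.length r 0 := by
  induction j with
  | zero =>
    rw [PySem.List.pyRange_neg_one_eq_nil (by omega : ((0:Nat) : Int) - 1 ≤ -1)]
    rfl
  | succ j ih =>
    have hcons : PySem.List.pyRange (((j+1 : Nat) : Int) - 1) (-1) (-1)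
        = (j : Int) :: PySem.List.pyRange ((j : Int) - 1) (-1) (-1) := by
      have h1 : ((j+1 : Nat) : Int) - 1 = (j : Int) := by push_cast; ring
      rw [h1, PySem.List.pyRange_neg_one_cons (by omega)]
    rw [hcons, List.foldl_cons, stepA_eq m hPre r j hr (by omega)]
    exact ih (by omega)

theorem outerFold_eq (m : List (List Int)) (hPre : Pre_preComputeNumOfZeroes m)
    (k : Nat) (hk : k ≤ m.length) :
    (PySem.List.pyRange ((k : Int) - 1) (-1) (-1)).foldl
      (fun g row =>
        (PySem.List.pyRange ((m.length : Int) - 1) (-1) (-1)).foldl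
          (fun g col => pvStepA m ((m.length : Int) - 1) g row col) g)
      (ggrid m m.length k)
      = ggrid m m.length 0 := by
  induction k with
  | zero =>
    rw [PySem.List.pyRange_neg_one_eq_nil (by omega : ((0:Nat) : Int) - 1 ≤ -1)]
    rfl
  | succ k ih =>
    have hcons : PySem.List.pyRange (((k+1 : Nat) : Int) - 1) (-1) (-1)
        = (k : Int) :: PySem.List.pyRange ((k : Int) - 1) (-1) (-1) := by
      have h1 : ((k+1 : Nat) : Int) - 1 = (k : Int) := by push_cast; ring
      rw [h1, PySem.List.pyRange_neg_one_cons (by omega)]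
    have hrow : (PySem.List.pyRange ((m.length : Int) - 1) (-1) (-1)).foldl
        (fun g col => pvStepA m ((m.length : Int) - 1) g (k : Int) col)
        (ggrid m m.length (k+1)) = ggrid m m.length k := by
      rw [← hgrid_top m m.length k,
        innerFold_eq m hPre k (by omega) m.length le_rfl, hgrid_bot]
    rw [hcons, List.foldl_cons, hrow]
    exact ih (by omega)

theorem portA_eq (m : List (List Int)) (hPre : Pre_preComputeNumOfZeroes m) :
    preComputeNumOfZeroes m = (List.range m.length).map (fun r => (List.range m.length).map (fcell m m.length r)) := by
  simp only [preComputeNumOfZeroes]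
  have hinit : (PySem.List.pyRange 0 (m.length : Int) 1).map (fun row =>
      (PySem.List.pyRange 0 (m.length : Int) 1).map (fun col =>
        [("numZeroesBelow", if pvGetA m row col = 0 then (1:Int) else 0),
         ("numZeroesRight", if pvGetA m row col = 0 then (1:Int) else 0)]))
      = ggrid m m.length m.length := by
    rw [PySem.List.pyRange_zero_natCast, List.map_map]
    apply List.map_congr_left
    intro r hrm
    rw [if_pos (List.mem_range.mp hrm)]
    simp only [Function.comp_apply, List.map_map]
    apply List.map_congr_left
    intro c _
    simp [icell, pvGetA, geti, PySem.List.pyGetD_natCast]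
  rw [hinit, outerFold_eq m hPre m.length le_rfl]
  apply List.map_congr_left
  intro r _
  rw [if_neg (by omega : ¬ r < 0)]

-- ===== VERDICT (by name: the statement is the Claim_ definition above) =====
theorem preComputeNumOfZeroes_spec : Claim_equal_preComputeNumOfZeroes := by
  intro matrix _ hPre
  unfold Spec_preComputeNumOfZeroes
  rw [portA_eq matrix hPre, portB_eq matrix hPre]
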